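-- pv_equiv track=rewrite | github.com/cdylpp/srt | src/utils.py | format_headers
-- ===== SOURCE A (Python) =====
-- def format_headers(input_str):
--     words = []
--     current_word = ''
--
--     for char in input_str:
--         if char.isalpha():
--             current_word += char
--         elif current_word:
--             words.append(current_word)
--             current_word = ''
--
--     if current_word:
--         words.append(current_word)
--
--     formatted_str = ' '.join(word.capitalize() for word in words)
--     return formatted_str
-- ===== SOURCE B (Python) =====
-- def format_headers(input_str):
--     # Two-pointer scan over maximal alphabetic runs instead of a char-by-char
--     # accumulate/flush state machine.
--     words = []
--     i, n = 0, len(input_str)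
--     while i < n:
--         if input_str[i].isalpha():
--             j = i
--             while j < n and input_str[j].isalpha():
--                 j += 1
--             words.append(input_str[i:j])
--             i = j
--         else:
--             i += 1
--     return ' '.join(w.capitalize() for w in words)
-- ===== Notes on version B (the rewrite author's own statement) =====
-- stated objective: alternative
-- what changed: Replaces the per-character accumulate/flush state machine with a two-pointer scan that slices out each maximal alphabetic run directly.
import Mathlib
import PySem

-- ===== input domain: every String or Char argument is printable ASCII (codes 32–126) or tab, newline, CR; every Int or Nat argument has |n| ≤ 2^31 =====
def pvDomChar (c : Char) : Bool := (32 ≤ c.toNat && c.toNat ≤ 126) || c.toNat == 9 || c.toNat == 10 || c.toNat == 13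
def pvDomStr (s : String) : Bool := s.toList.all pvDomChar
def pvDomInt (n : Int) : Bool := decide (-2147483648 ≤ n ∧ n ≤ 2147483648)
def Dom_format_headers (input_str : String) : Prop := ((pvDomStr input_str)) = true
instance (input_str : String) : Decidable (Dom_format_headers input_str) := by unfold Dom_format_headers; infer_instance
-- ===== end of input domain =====

-- B replaces A's per-character accumulate/flush state machine with a two-pointer
-- scan over maximal alphabetic runs; same output, proved equal (return value only).

-- word.capitalize() : first char uppercased, rest lowercased (exact on ASCII letters)
def pvCap (w : List Char) : List Char :=
  match w with
  | [] => []
  | c :: cs => PySem.Chars.upperChar c :: cs.map PySem.Chars.lowerChar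

-- ===== PORT A =====
-- the for-loop of A: state (words, current_word)
def faLoop : List Char → List (List Char) → List Char → (List (List Char) × List Char)
  | [], ws, cw => (ws, cw)
  | c :: rest, ws, cw =>
    if PySem.Chars.isalpha c then faLoop rest ws (cw ++ [c])
    else if cw ≠ [] then faLoop rest (ws ++ [cw]) []
    else faLoop rest ws cw

def format_headers (input_str : String) : String :=
  let p := faLoop input_str.toList [] []
  let words := if p.2 ≠ [] then p.1 ++ [p.2] else p.1
  String.mk (PySem.Chars.join [' '] (words.map pvCap))

-- ===== PORT B =====
-- maximal alphabetic runs (the inner while is a span/takeWhile over the run)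
def fbRuns : List Char → List (List Char)
  | [] => []
  | c :: cs =>
    if PySem.Chars.isalpha c then
      (c :: cs.takeWhile PySem.Chars.isalpha) :: fbRuns (cs.dropWhile PySem.Chars.isalpha)
    else fbRuns cs
termination_by l => l.length
decreasing_by
  exact Nat.lt_succ_of_le (List.length_dropWhile_le _ _)
  simp

def format_headers_alt (input_str : String) : String :=
  String.mk (PySem.Chars.join [' '] ((fbRuns input_str.toList).map pvCap))

-- ===== PRECONDITION & SPEC =====
def Spec_format_headers (input_str : String) (out : String) : Prop := out = format_headers_alt input_str
instance (input_str : String) (out : String) : Decidable (Spec_format_headers input_str out) := by unfold Spec_format_headers; infer_instance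

-- ===== CLAIM =====
def Claim_equal_format_headers : Prop := ∀ (input_str : String), Dom_format_headers input_str → Spec_format_headers input_str (format_headers input_str)

-- ===== LEMMAS AND PROOFS =====
-- words produced with a nonempty pending word cw
def pvPend (cw : List Char) : List Char → List (List Char)
  | [] => [cw]
  | c :: cs => if PySem.Chars.isalpha c then pvPend (cw ++ [c]) cs else cw :: fbRuns cs

lemma fbRuns_nil : fbRuns [] = [] := by rw [fbRuns]

lemma fbRuns_cons (c : Char) (cs : List Char) :
    fbRuns (c :: cs) =
      if PySem.Chars.isalpha c then
        (c :: cs.takeWhile PySem.Chars.isalpha) :: fbRuns (cs.dropWhile PySem.Chars.isalpha)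
      else fbRuns cs := by
  rw [fbRuns]

def pvFin (p : List (List Char) × List Char) : List (List Char) :=
  if p.2 ≠ [] then p.1 ++ [p.2] else p.1

lemma pvPend_eq (cs : List Char) : ∀ cw : List Char,
    pvPend cw cs = (cw ++ cs.takeWhile PySem.Chars.isalpha) :: fbRuns (cs.dropWhile PySem.Chars.isalpha) := by
  induction cs with
  | nil => intro cw; simp [pvPend, fbRuns_nil]
  | cons c cs ih =>
    intro cw
    by_cases h : PySem.Chars.isalpha c = true
    · simp [pvPend, h, ih, List.takeWhile_cons, List.dropWhile_cons]
    · simp [pvPend, h, fbRuns_cons, List.takeWhile_cons, List.dropWhile_cons]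

lemma faLoop_eq (l : List Char) : ∀ (ws : List (List Char)) (cw : List Char),
    pvFin (faLoop l ws cw) = ws ++ (if cw = [] then fbRuns l else pvPend cw l) := by
  induction l with
  | nil =>
    intro ws cw
    by_cases h : cw = [] <;> simp [faLoop, pvFin, fbRuns_nil, pvPend, h]
  | cons c cs ih =>
    intro ws cw
    by_cases ha : PySem.Chars.isalpha c = true
    · rw [show faLoop (c :: cs) ws cw = faLoop cs ws (cw ++ [c]) from by simp [faLoop, ha], ih]
      by_cases h : cw = []
      · simp [h, fbRuns_cons, ha, pvPend_eq]
      · simp [h, pvPend, ha]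
    · by_cases h : cw = []
      · rw [show faLoop (c :: cs) ws cw = faLoop cs ws cw from by simp [faLoop, ha, h], ih]
        simp [h, fbRuns_cons, ha]
      · rw [show faLoop (c :: cs) ws cw = faLoop cs (ws ++ [cw]) [] from by simp [faLoop, ha, h], ih]
        simp [pvPend, ha, h]

lemma words_eq (l : List Char) :
    (if (faLoop l [] []).2 ≠ [] then (faLoop l [] []).1 ++ [(faLoop l [] []).2] else (faLoop l [] []).1) = fbRuns l := by
  have := faLoop_eq l [] []
  simpa [pvFin] using this

-- ===== VERDICT =====
theorem format_headers_spec : Claim_equal_format_headers := by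
  intro s _
  show format_headers s = format_headers_alt s
  simp only [format_headers, format_headers_alt, words_eq]
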